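-- pv_equiv track=rewrite | github.com/mortemn/COMP34111-AI-Games-Hex | agents/Group25/Bitboard.py | precompute
-- ===== SOURCE A (Python) =====
-- NEIGHBOURS = [(-1, 0), (-1, 1), (0, -1), (0, 1), (1, -1), (1, 0)]
--
-- def precompute(size):
--     neighbour_table = {}
--
--     for x in range(size):
--         for y in range(size):
--             idx = x * size + y
--             mask = 0
--             for dx, dy in NEIGHBOURS:
--                 nx, ny = x + dx, y + dy
--                 if 0 <= nx < size and 0 <= ny < size:
--                     nidx = nx * size + ny
--                     mask |= 1 << nidx
--             neighbour_table[idx] = mask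
--     return neighbour_table
-- ===== SOURCE B (Python) =====
-- # Scatter construction: seed every cell with 0, then add each adjacency edge once
-- # via the three forward offsets, setting the bit on both endpoints.
-- FORWARD = [(1, 0), (1, -1), (0, 1)]
--
-- def precompute(size):
--     n = max(size, 0)
--     table = [0] * (n * n)
--     for x in range(size):
--         for y in range(size):
--             idx = x * size + y
--             for dx, dy in FORWARD:
--                 nx, ny = x + dx, y + dy
--                 if 0 <= nx < size and 0 <= ny < size:
--                     nidx = nx * size + ny
--                     table[idx] |= 1 << nidx
--                     table[nidx] |= 1 << idx
--     return {i: m for i, m in enumerate(table)}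
-- ===== Notes on version B (the rewrite author's own statement) =====
-- stated objective: alternative
-- what changed: Replaces the per-cell gather over all six neighbour offsets by a scatter that seeds a zero table for every cell and adds each adjacency edge exactly once via the three forward offsets, setting the bit on both endpoints.
import Mathlib
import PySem

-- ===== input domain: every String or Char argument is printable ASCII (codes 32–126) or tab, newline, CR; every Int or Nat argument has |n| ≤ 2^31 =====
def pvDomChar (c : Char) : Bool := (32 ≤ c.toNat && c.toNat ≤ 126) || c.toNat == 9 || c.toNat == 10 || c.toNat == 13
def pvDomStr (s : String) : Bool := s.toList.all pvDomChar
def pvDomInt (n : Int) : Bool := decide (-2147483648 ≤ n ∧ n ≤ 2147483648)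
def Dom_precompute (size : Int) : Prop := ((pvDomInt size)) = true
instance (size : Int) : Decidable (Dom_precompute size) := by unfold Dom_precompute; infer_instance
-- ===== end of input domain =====

-- B replaces A's per-cell gather over all six offsets by an edge scatter: a zero-seeded
-- table, each adjacency edge added once via the three forward offsets, setting both endpoints.

-- ===== PORT A =====
def pvNEIGHBOURS : List (Int × Int) := [(-1, 0), (-1, 1), (0, -1), (0, 1), (1, -1), (1, 0)]

-- literal port of A; under the bounds guard nidx = nx*size+ny ≥ 0, so `.toNat` is exact
def precompute (size : Int) : List (Int × Int) :=
  ((PySem.List.pyRange 0 size).foldl (fun d x =>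
    (PySem.List.pyRange 0 size).foldl (fun d y =>
      let idx := x * size + y
      let mask := pvNEIGHBOURS.foldl (fun m p =>
        let nx := x + p.1
        let ny := y + p.2
        if 0 ≤ nx ∧ nx < size ∧ 0 ≤ ny ∧ ny < size then
          PySem.Int.bor m ((1 : Int) <<< (nx * size + ny).toNat)
        else m) 0
      d.insert idx mask) d) (PySem.Dict.empty : PySem.Dict Int Int)).items

-- ===== PORT B =====
def pvFORWARD : List (Int × Int) := [(1, 0), (1, -1), (0, 1)]

-- literal port of B; both table indices are in range whenever they are used, so
-- List.getD/List.set is exact for Python's table[i] read/write there; the final dict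
-- comprehension has the distinct keys 0..n*n-1, so its items are exactly enumerate(table)
def precompute_alt (size : Int) : List (Int × Int) :=
  let n := max size 0
  let table0 : List Int := List.replicate (n * n).toNat 0
  let table := (PySem.List.pyRange 0 size).foldl (fun t x =>
    (PySem.List.pyRange 0 size).foldl (fun t y =>
      let idx := x * size + y
      pvFORWARD.foldl (fun t p =>
        let nx := x + p.1
        let ny := y + p.2
        if 0 ≤ nx ∧ nx < size ∧ 0 ≤ ny ∧ ny < size then
          let nidx := nx * size + ny
          let t1 := t.set idx.toNat (PySem.Int.bor (t.getD idx.toNat 0) ((1 : Int) <<< nidx.toNat))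
          t1.set nidx.toNat (PySem.Int.bor (t1.getD nidx.toNat 0) ((1 : Int) <<< idx.toNat))
        else t) t) t) table0
  PySem.List.enumerate table

-- ===== PRECONDITION & SPEC =====
def Spec_precompute (size : Int) (out : List (Int × Int)) : Prop := out = precompute_alt size
instance (size : Int) (out : List (Int × Int)) : Decidable (Spec_precompute size out) := by unfold Spec_precompute; infer_instance

-- ===== CLAIM (what is proved, stated in full; the proofs are below) =====
def Claim_equal_precompute : Prop := ∀ (size : Int), Dom_precompute size → Spec_precompute size (precompute size)

-- ===== LEMMAS AND PROOFS =====

-- proof-side vocabulary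
def pvCells (s : Nat) : List (Nat × Nat) :=
  (List.range s).flatMap (fun x => (List.range s).map (fun y => (x, y)))

def pvNbrs (offs : List (Int × Int)) (s x y : Nat) : List Nat :=
  offs.filterMap (fun p =>
    if 0 ≤ (x : Int) + p.1 ∧ (x : Int) + p.1 < (s : Int) ∧
       0 ≤ (y : Int) + p.2 ∧ (y : Int) + p.2 < (s : Int)
    then some ((((x : Int) + p.1) * (s : Int) + ((y : Int) + p.2)).toNat) else none)

def pvEdges (s : Nat) : List (Nat × Nat) :=
  (pvCells s).flatMap (fun c => (pvNbrs pvFORWARD s c.1 c.2).map (fun d => (c.1 * s + c.2, d)))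

def pvUpd (t : List Int) (e : Nat × Nat) : List Int :=
  let t1 := t.set e.1 (PySem.Int.bor (t.getD e.1 0) ((1 : Int) <<< e.2))
  t1.set e.2 (PySem.Int.bor (t1.getD e.2 0) ((1 : Int) <<< e.1))

def pvInc (c : Nat) (E : List (Nat × Nat)) : List Nat :=
  E.flatMap (fun e => (if e.1 = c then [e.2] else []) ++ (if e.2 = c then [e.1] else []))

def pvOrF (a : Nat) (l : List Nat) : Nat := l.foldl (fun m d => m ||| (1 <<< d)) a

def pvOrFI (a : Int) (l : List Nat) : Int :=
  l.foldl (fun m (d : Nat) => PySem.Int.bor m ((1 : Int) <<< d)) a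

def pvMask (s x y : Nat) : Int := pvOrFI 0 (pvNbrs pvNEIGHBOURS s x y)

theorem pvIntIdx_inj (S a b a' b' : Int) (hb0 : 0 ≤ b) (hb1 : b < S) (hb0' : 0 ≤ b') (hb1' : b' < S)
    (h : a * S + b = a' * S + b') : a = a' ∧ b = b' := by
  have hS : 0 < S := lt_of_le_of_lt hb0 hb1
  have ha : a = a' := by
    rcases lt_trichotomy a a' with h1 | h1 | h1
    · exfalso
      have : (a + 1) * S ≤ a' * S := mul_le_mul_of_nonneg_right (by omega) hS.le
      nlinarith
    · exact h1
    · exfalso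
      have : (a' + 1) * S ≤ a * S := mul_le_mul_of_nonneg_right (by omega) hS.le
      nlinarith
  subst ha
  omega

theorem pvGetD_set (t : List Int) (i : Nat) (v : Int) (c : Nat) (hi : i < t.length) :
    (t.set i v).getD c 0 = if i = c then v else t.getD c 0 := by
  rw [List.getD_eq_getElem?_getD, List.getD_eq_getElem?_getD, List.getElem?_set]
  split <;> simp

theorem pvFwd_sub : ∀ p ∈ pvFORWARD, p ∈ pvNEIGHBOURS := by decide

theorem pvFwd_neg : ∀ p ∈ pvFORWARD, ((-p.1, -p.2) : Int × Int) ∈ pvNEIGHBOURS := by decide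

theorem pvAll_cases : ∀ p ∈ pvNEIGHBOURS, p ∈ pvFORWARD ∨ ((-p.1, -p.2) : Int × Int) ∈ pvFORWARD := by decide

theorem pvNatIdx_inj (s u v x y : Nat) (hv : v < s) (hy : y < s) (h : u * s + v = x * s + y) :
    u = x ∧ v = y := by
  have := pvIntIdx_inj (s : Int) (u : Int) (v : Int) (x : Int) (y : Int)
    (by positivity) (by exact_mod_cast hv) (by positivity) (by exact_mod_cast hy)
    (by exact_mod_cast h)
  exact ⟨by exact_mod_cast this.1, by exact_mod_cast this.2⟩

theorem pvMem_pvInc (c q : Nat) (E : List (Nat × Nat)) :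
    q ∈ pvInc c E ↔ ∃ e ∈ E, (e.1 = c ∧ e.2 = q) ∨ (e.2 = c ∧ e.1 = q) := by
  rw [pvInc, List.mem_flatMap]
  constructor
  · rintro ⟨e, he, hq⟩
    rw [List.mem_append] at hq
    refine ⟨e, he, ?_⟩
    rcases hq with hq | hq <;>
    · split at hq
      · simp at hq
        tauto
      · cases hq
  · rintro ⟨e, he, h⟩
    refine ⟨e, he, ?_⟩
    rw [List.mem_append]
    rcases h with ⟨h1, h2⟩ | ⟨h1, h2⟩
    · exact Or.inl (by simp [h1, h2])
    · exact Or.inr (by simp [h1, h2])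


theorem pvShiftCast (d : Nat) : ((1 : Int) <<< d) = ((1 <<< d : Nat) : Int) := by
  simp [Int.shiftLeft_eq, Nat.shiftLeft_eq]

theorem pvOrFI_natCast (l : List Nat) (a : Nat) : pvOrFI (a : Int) l = ((pvOrF a l : Nat) : Int) := by
  induction l generalizing a with
  | nil => rfl
  | cons d l ih =>
    have h1 : pvOrFI (a : Int) (d :: l) = pvOrFI (PySem.Int.bor (a : Int) ((1 : Int) <<< d)) l := rfl
    have h2 : pvOrF a (d :: l) = pvOrF (a ||| (1 <<< d)) l := rfl
    rw [h1, h2, pvShiftCast, PySem.Int.bor_natCast, ih]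

theorem pvTestBit_orF (l : List Nat) (a : Nat) (i : Nat) :
    (pvOrF a l).testBit i = (a.testBit i || l.any (· == i)) := by
  induction l generalizing a with
  | nil => simp [pvOrF]
  | cons d l ih =>
    have h2 : pvOrF a (d :: l) = pvOrF (a ||| (1 <<< d)) l := rfl
    rw [h2, ih, List.any_cons, Nat.testBit_or, Nat.shiftLeft_eq, one_mul, Nat.testBit_two_pow]
    by_cases h : d = i <;> simp [h, beq_iff_eq, Bool.or_comm, Bool.or_left_comm]

theorem pvOrF_ext (l₁ l₂ : List Nat) (a : Nat) (h : ∀ q, q ∈ l₁ ↔ q ∈ l₂) :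
    pvOrF a l₁ = pvOrF a l₂ := by
  apply Nat.eq_of_testBit_eq
  intro i
  rw [pvTestBit_orF, pvTestBit_orF]
  have hb : ∀ (l : List Nat), (l.any (· == i)) = decide (i ∈ l) := by
    intro l
    apply Bool.eq_iff_iff.mpr
    simp only [List.any_eq_true, beq_iff_eq, decide_eq_true_eq]
    exact ⟨fun ⟨x, hx, e⟩ => e ▸ hx, fun hi => ⟨i, hi, rfl⟩⟩
  rw [hb, hb]
  simp [h i]

theorem pvLength_pvUpd (t : List Int) (e : Nat × Nat) : (pvUpd t e).length = t.length := by
  simp [pvUpd]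

theorem pvLength_foldl_pvUpd (E : List (Nat × Nat)) (t : List Int) :
    (E.foldl pvUpd t).length = t.length := by
  induction E generalizing t with
  | nil => rfl
  | cons e E ih => rw [List.foldl_cons, ih, pvLength_pvUpd]

theorem pvGetD_pvUpd (t : List Int) (e : Nat × Nat) (c : Nat)
    (h1 : e.1 < t.length) (h2 : e.2 < t.length) :
    (pvUpd t e).getD c 0 =
      pvOrFI (t.getD c 0) ((if e.1 = c then [e.2] else []) ++ (if e.2 = c then [e.1] else [])) := by
  have h2' : e.2 < (t.set e.1 (PySem.Int.bor (t.getD e.1 0) ((1 : Int) <<< e.2))).length := by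
    simpa using h2
  rw [pvUpd]
  rw [pvGetD_set _ _ _ _ h2', pvGetD_set _ _ _ _ h1]
  by_cases ha : e.1 = c <;> by_cases hb : e.2 = c <;>
    simp [ha, hb, pvOrFI] <;>
    (rw [List.getElem?_set]; simp [ha ▸ h1])

theorem pvGetD_foldl_pvUpd (E : List (Nat × Nat)) (t : List Int)
    (hE : ∀ e ∈ E, e.1 < t.length ∧ e.2 < t.length) (c : Nat) :
    (E.foldl pvUpd t).getD c 0 = pvOrFI (t.getD c 0) (pvInc c E) := by
  induction E generalizing t with
  | nil => rfl
  | cons e E ih =>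
    rw [List.foldl_cons]
    have he := hE e List.mem_cons_self
    have hE' : ∀ e' ∈ E, e'.1 < (pvUpd t e).length ∧ e'.2 < (pvUpd t e).length := by
      intro e' he'
      rw [pvLength_pvUpd]
      exact hE e' (List.mem_cons_of_mem _ he')
    rw [ih _ hE', pvGetD_pvUpd t e c he.1 he.2]
    show _ = pvOrFI _ (pvInc c (e :: E))
    have : pvInc c (e :: E) =
        ((if e.1 = c then [e.2] else []) ++ (if e.2 = c then [e.1] else [])) ++ pvInc c E := by
      simp [pvInc]
    rw [this]
    simp only [pvOrFI, List.foldl_append]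

theorem pvMem_pvNbrs (offs : List (Int × Int)) (s x y d : Nat) :
    d ∈ pvNbrs offs s x y ↔ ∃ p ∈ offs,
      (0 ≤ (x : Int) + p.1 ∧ (x : Int) + p.1 < (s : Int) ∧
       0 ≤ (y : Int) + p.2 ∧ (y : Int) + p.2 < (s : Int)) ∧
      (d : Int) = ((x : Int) + p.1) * (s : Int) + ((y : Int) + p.2) := by
  rw [pvNbrs, List.mem_filterMap]
  constructor
  · rintro ⟨p, hp, hf⟩
    by_cases hg : 0 ≤ (x : Int) + p.1 ∧ (x : Int) + p.1 < (s : Int) ∧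
       0 ≤ (y : Int) + p.2 ∧ (y : Int) + p.2 < (s : Int)
    · rw [if_pos hg] at hf
      refine ⟨p, hp, hg, ?_⟩
      have hnn : 0 ≤ ((x : Int) + p.1) * (s : Int) + ((y : Int) + p.2) :=
        add_nonneg (mul_nonneg hg.1 (by positivity)) hg.2.2.1
      have := Option.some.inj hf
      rw [← this, Int.toNat_of_nonneg hnn]
    · rw [if_neg hg] at hf; cases hf
  · rintro ⟨p, hp, hg, hd⟩
    refine ⟨p, hp, ?_⟩
    rw [if_pos hg]
    congr 1
    rw [← hd, Int.toNat_natCast]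

theorem pvMem_pvCells (s u v : Nat) : (u, v) ∈ pvCells s ↔ u < s ∧ v < s := by
  simp [pvCells, List.mem_flatMap, List.mem_map, List.mem_range, Prod.mk.injEq, eq_comm]

theorem pvNatIdx_lt (s u v : Nat) (hu : u < s) (hv : v < s) : u * s + v < s * s := by
  calc u * s + v < u * s + s := by omega
    _ = (u + 1) * s := by ring
    _ ≤ s * s := Nat.mul_le_mul_right s (by omega)

theorem pvNbrs_lt (offs : List (Int × Int)) (s x y d : Nat) (h : d ∈ pvNbrs offs s x y) :
    d < s * s := by
  rw [pvMem_pvNbrs] at h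
  obtain ⟨p, _, hg, hd⟩ := h
  have h1 : ((x : Int) + p.1 + 1) * (s : Int) ≤ (s : Int) * (s : Int) :=
    mul_le_mul_of_nonneg_right (by omega) (by positivity)
  have : (d : Int) < (s : Int) * (s : Int) := by nlinarith [hg.1, hg.2.1, hg.2.2.1, hg.2.2.2]
  exact_mod_cast this

theorem pvEdges_bounds (s : Nat) (e : Nat × Nat) (h : e ∈ pvEdges s) :
    e.1 < s * s ∧ e.2 < s * s := by
  rw [pvEdges, List.mem_flatMap] at h
  obtain ⟨c, hc, he⟩ := h
  rw [List.mem_map] at he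
  obtain ⟨d, hd, rfl⟩ := he
  obtain ⟨h1, h2⟩ := (pvMem_pvCells s c.1 c.2).mp hc
  exact ⟨pvNatIdx_lt s c.1 c.2 h1 h2, pvNbrs_lt _ s c.1 c.2 d hd⟩

theorem pvInc_mem (s x y q : Nat) (hx : x < s) (hy : y < s) :
    q ∈ pvInc (x * s + y) (pvEdges s) ↔ q ∈ pvNbrs pvNEIGHBOURS s x y := by
  rw [pvMem_pvInc]
  constructor
  · rintro ⟨e, he, hcase⟩
    rw [pvEdges, List.mem_flatMap] at he
    obtain ⟨c, hc, he⟩ := he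
    rw [List.mem_map] at he
    obtain ⟨d, hd, rfl⟩ := he
    obtain ⟨hu, hv⟩ := (pvMem_pvCells s c.1 c.2).mp hc
    rcases hcase with ⟨h1, h2⟩ | ⟨h1, h2⟩
    · -- c is the cell (x,y), q = d is a forward neighbour
      obtain ⟨hux, hvy⟩ := pvNatIdx_inj s c.1 c.2 x y hv hy h1
      subst h2
      rw [pvMem_pvNbrs] at hd ⊢
      obtain ⟨p, hp, hg, hval⟩ := hd
      exact ⟨p, pvFwd_sub p hp, by rw [← hux, ← hvy]; exact hg, by rw [← hux, ← hvy]; exact hval⟩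
    · -- d = idx(x,y): q = idx c is a backward neighbour of (x,y)
      simp only at h1 h2
      rw [pvMem_pvNbrs] at hd
      obtain ⟨p, hp, hg, hval⟩ := hd
      rw [h1] at hval
      have hcast : ((x * s + y : Nat) : Int) = (x : Int) * (s : Int) + (y : Int) := by push_cast; ring
      rw [hcast] at hval
      obtain ⟨hxe, hye⟩ := pvIntIdx_inj (s : Int) _ _ _ _
        hg.2.2.1 hg.2.2.2 (by positivity) (by exact_mod_cast hy) hval.symm
      rw [pvMem_pvNbrs]
      refine ⟨(-p.1, -p.2), pvFwd_neg p hp, ?_, ?_⟩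
      · constructor
        · simp; omega
        · refine ⟨by simp; omega, by simp; omega, by simp; omega⟩
      · simp only
        rw [← h2]
        push_cast
        nlinarith [hxe, hye]
  · intro hq
    rw [pvMem_pvNbrs] at hq
    obtain ⟨p, hp, hg, hval⟩ := hq
    rcases pvAll_cases p hp with hf | hf
    · -- forward offset: the edge is generated at cell (x,y)
      refine ⟨(x * s + y, q), ?_, Or.inl ⟨rfl, rfl⟩⟩
      rw [pvEdges, List.mem_flatMap]
      refine ⟨(x, y), (pvMem_pvCells s x y).mpr ⟨hx, hy⟩, ?_⟩
      rw [List.mem_map]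
      exact ⟨q, (pvMem_pvNbrs pvFORWARD s x y q).mpr ⟨p, hf, hg, hval⟩, rfl⟩
    · -- backward offset: the edge is generated at the neighbour cell
      set u := ((x : Int) + p.1).toNat with hu
      set v := ((y : Int) + p.2).toNat with hv
      have hui : (u : Int) = (x : Int) + p.1 := Int.toNat_of_nonneg hg.1
      have hvi : (v : Int) = (y : Int) + p.2 := Int.toNat_of_nonneg hg.2.2.1
      have hus : u < s := by omega
      have hvs : v < s := by omega
      have hquv : q = u * s + v := by
        have : (q : Int) = ((u * s + v : Nat) : Int) := by push_cast; rw [hui, hvi]; exact hval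
        exact_mod_cast this
      refine ⟨(u * s + v, x * s + y), ?_, Or.inr ⟨rfl, hquv.symm⟩⟩
      rw [pvEdges, List.mem_flatMap]
      refine ⟨(u, v), (pvMem_pvCells s u v).mpr ⟨hus, hvs⟩, ?_⟩
      rw [List.mem_map]
      refine ⟨x * s + y, ?_, rfl⟩
      rw [pvMem_pvNbrs]
      refine ⟨(-p.1, -p.2), hf, ?_, ?_⟩
      · refine ⟨by simp; omega, by simp; omega, by simp; omega, by simp; omega⟩
      · simp only
        push_cast
        nlinarith [hui, hvi]

theorem pvPyRangeNat (s : Nat) :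
    PySem.List.pyRange 0 (s : Int) = (List.range s).map (fun k : Nat => (k : Int)) := by
  rw [PySem.List.pyRange_one]
  simp

theorem pvMaskFold (s x y : Nat) :
    pvNEIGHBOURS.foldl (fun m p =>
      if 0 ≤ (x : Int) + p.1 ∧ (x : Int) + p.1 < (s : Int) ∧
         0 ≤ (y : Int) + p.2 ∧ (y : Int) + p.2 < (s : Int)
      then PySem.Int.bor m ((1 : Int) <<< ((((x : Int) + p.1) * (s : Int) + ((y : Int) + p.2)).toNat))
      else m) 0 = pvMask s x y := by
  rw [pvMask, pvOrFI, pvNbrs, List.foldl_filterMap]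
  apply PySem.List.foldl_congr_mem
  intro acc p _
  dsimp only
  split <;> rfl

theorem pvCells_nodup (s : Nat) : (pvCells s).Nodup := by
  rw [show pvCells s = List.range s ×ˢ List.range s from rfl]
  exact List.Nodup.product List.nodup_range List.nodup_range

theorem pvA_eq (s : Nat) :
    precompute (s : Int) =
      (pvCells s).map (fun c => (((c.1 * s + c.2 : Nat) : Int), pvMask s c.1 c.2)) := by
  rw [precompute, pvPyRangeNat]
  simp only [List.foldl_map]
  have hflat : (List.range s).foldl (fun d x => (List.range s).foldl
        (fun d y => d.insert ((x : Int) * (s : Int) + (y : Int))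
          (pvNEIGHBOURS.foldl (fun m p =>
            if 0 ≤ (x : Int) + p.1 ∧ (x : Int) + p.1 < (s : Int) ∧
               0 ≤ (y : Int) + p.2 ∧ (y : Int) + p.2 < (s : Int)
            then PySem.Int.bor m ((1 : Int) <<< ((((x : Int) + p.1) * (s : Int) + ((y : Int) + p.2)).toNat))
            else m) 0)) d) (PySem.Dict.empty : PySem.Dict Int Int) =
      (pvCells s).foldl (fun d c => d.insert ((c.1 : Int) * (s : Int) + (c.2 : Int))
        (pvMask s c.1 c.2)) (PySem.Dict.empty : PySem.Dict Int Int) := by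
    rw [pvCells, List.foldl_flatMap]
    apply PySem.List.foldl_congr_mem
    intro acc x _
    rw [List.foldl_map]
    apply PySem.List.foldl_congr_mem
    intro acc2 y _
    rw [pvMaskFold]
  rw [hflat]
  rw [PySem.Dict.items_foldl_insert_fresh (pvCells s)
    (fun c => (c.1 : Int) * (s : Int) + (c.2 : Int)) (fun c => pvMask s c.1 c.2) _
    (by intro a _; rfl)
    (by
      apply List.Nodup.map_on _ (pvCells_nodup s)
      intro c hc c' hc' hkey
      obtain ⟨h1, h2⟩ := (pvMem_pvCells s c.1 c.2).mp (by simpa using hc)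
      obtain ⟨h1', h2'⟩ := (pvMem_pvCells s c'.1 c'.2).mp (by simpa using hc')
      have hnat : c.1 * s + c.2 = c'.1 * s + c'.2 := by exact_mod_cast (by push_cast at hkey ⊢; linarith [hkey] : ((c.1 * s + c.2 : Nat) : Int) = ((c'.1 * s + c'.2 : Nat) : Int))
      obtain ⟨e1, e2⟩ := pvNatIdx_inj s c.1 c.2 c'.1 c'.2 h2 h2' hnat
      exact Prod.ext e1 e2)]
  rw [show (PySem.Dict.empty : PySem.Dict Int Int).items = [] from rfl, List.nil_append]
  apply List.map_congr_left
  intro c _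
  congr 1

theorem pvB_eq (s : Nat) :
    precompute_alt (s : Int) =
      PySem.List.enumerate ((pvEdges s).foldl pvUpd (List.replicate (s * s) (0 : Int))) := by
  have hmax : max ((s : Int)) 0 = (s : Int) := max_eq_left (by positivity)
  have hrep : ((s : Int) * (s : Int)).toNat = s * s := by
    rw [show (s : Int) * (s : Int) = ((s * s : Nat) : Int) by push_cast; ring, Int.toNat_natCast]
  rw [precompute_alt]
  simp only [hmax, hrep, pvPyRangeNat, List.foldl_map]
  congr 1
  rw [pvEdges, List.foldl_flatMap, pvCells, List.foldl_flatMap]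
  simp only [List.foldl_map]
  apply PySem.List.foldl_congr_mem
  intro t x _
  apply PySem.List.foldl_congr_mem
  intro t2 y _
  dsimp only
  have hidx : ((x : Int) * (s : Int) + (y : Int)).toNat = x * s + y := by
    rw [show (x : Int) * (s : Int) + (y : Int) = ((x * s + y : Nat) : Int) by push_cast; ring,
      Int.toNat_natCast]
  rw [pvNbrs, List.foldl_filterMap]
  apply PySem.List.foldl_congr_mem
  intro t3 p _
  dsimp only
  split
  · rw [hidx]
    rfl
  · rfl

theorem pvMap_range_mul {α : Type} (F : Nat → α) (a s : Nat) :
    (List.range (a * s)).map F =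
      (List.range a).flatMap (fun x => (List.range s).map (fun y => F (x * s + y))) := by
  induction a with
  | zero => simp
  | succ a ih =>
    rw [Nat.succ_mul, List.range_add, List.map_append, ih, List.range_succ,
      List.flatMap_append]
    simp [List.map_map, Function.comp_def]

theorem pvTable_entry (s x y : Nat) (hx : x < s) (hy : y < s) :
    ((pvEdges s).foldl pvUpd (List.replicate (s * s) (0 : Int))).getD (x * s + y) 0 =
      pvMask s x y := by
  rw [pvGetD_foldl_pvUpd _ _ (by
    intro e he
    rw [List.length_replicate]
    exact pvEdges_bounds s e he)]
  have h0 : (List.replicate (s * s) (0 : Int)).getD (x * s + y) 0 = 0 := by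
    rw [List.getD_eq_getElem?_getD, List.getElem?_replicate]
    split <;> rfl
  rw [h0, pvMask]
  rw [show (0 : Int) = ((0 : Nat) : Int) from rfl, pvOrFI_natCast, pvOrFI_natCast]
  exact congrArg _ (pvOrF_ext _ _ _ (fun q => pvInc_mem s x y q hx hy))

-- ===== VERDICT (by name: the statement is the Claim_ definition above) =====
theorem pvRangeMulFlat (s : Nat) (G : Nat → Int) :
    (List.range (s * s)).map (fun k => (((k : Nat) : Int), G k)) =
      (List.range s).flatMap (fun x => (List.range s).map
        (fun y => (((x * s + y : Nat) : Int), G (x * s + y)))) :=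
  pvMap_range_mul (fun k => (((k : Nat) : Int), G k)) s s

theorem precompute_spec : Claim_equal_precompute := by
  unfold Claim_equal_precompute
  intro size _
  unfold Spec_precompute
  by_cases hpos : 0 ≤ size
  · obtain ⟨s, rfl⟩ : ∃ s : Nat, size = (s : Int) := ⟨size.toNat, (Int.toNat_of_nonneg hpos).symm⟩
    rw [pvA_eq, pvB_eq]
    set T := (pvEdges s).foldl pvUpd (List.replicate (s * s) (0 : Int)) with hT
    have hlen : T.length = s * s := by
      rw [hT, pvLength_foldl_pvUpd, List.length_replicate]
    rw [PySem.List.enumerate_eq_map_pyRange T (0 : Int)]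
    have hlen2 : PySem.List.len T = ((s * s : Nat) : Int) := by
      simp [PySem.List.len, hlen]
    rw [hlen2, pvPyRangeNat, List.map_map]
    have hmapR : (List.range (s * s)).map ((fun j => (j, PySem.List.pyGetD T j 0)) ∘ fun k : Nat => (k : Int)) =
        (List.range (s * s)).map (fun k : Nat => (((k : Nat) : Int), T.getD k 0)) := by
      apply List.map_congr_left
      intro k _
      simp [PySem.List.pyGetD_natCast]
    rw [hmapR, pvRangeMulFlat s (fun k => T.getD k 0)]
    rw [pvCells, List.map_flatMap]
    rw [List.flatMap_def, List.flatMap_def]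
    apply congrArg List.flatten
    apply List.map_congr_left
    intro x hx
    rw [List.map_map]
    apply List.map_congr_left
    intro y hy
    simp only [Function.comp_def]
    rw [pvTable_entry s x y (List.mem_range.mp hx) (List.mem_range.mp hy)]
  · have hneg : size < 0 := by omega
    have hR0 : PySem.List.pyRange 0 size = [] := by
      rw [PySem.List.pyRange_one, show (size - 0).toNat = 0 from by omega]
      simp
    have hmax : max size 0 = 0 := max_eq_right hneg.le
    rw [precompute, precompute_alt, hR0]
    simp [hmax]
    rfl
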